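-- pv_equiv track=rewrite | github.com/ModPunchtree/URCL-Optimiser-V2 | URCLOptimiserV2/urcl_optimiser_v2.py | reduceRegisters
-- ===== SOURCE A (Python) =====
-- def reduceRegisters(code: list):
--
--     success = False
--
--     usefulRegisters = []
--     for line in code:
--         for token in line[1: ]:
--             if token.startswith("R"):
--                 number = int(token[1: ], 0)
--                 if number not in usefulRegisters:
--                     usefulRegisters.append(number)
--
--     MINREG = calculateMINREG(code)
--
--     pointer = 1
--     while pointer <= MINREG:
--         if pointer not in usefulRegisters:
--             for index, line in enumerate(code):
--                 for index2, token in enumerate(line):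
--                     if token == f"R{MINREG}":
--                         code[index][index2] = f"R{pointer}"
--             usefulRegisters.pop(usefulRegisters.index(MINREG))
--             usefulRegisters.append(pointer)
--             MINREG = calculateMINREG(code)
--             success = True
--
--         pointer += 1
--
--     return code, MINREG, success
--
-- def calculateMINREG(code: list):
--
--     MINREG = 0
--     for line in code:
--         for token in line[1: ]:
--             if token.startswith("R"):
--                 number = int(token[1: ], 0)
--                 if number > MINREG:
--                     MINREG = number
--
--     return MINREG
-- ===== SOURCE B (Python) =====
-- def reduceRegisters(code: list):
--     # One-pass compaction: collect the used register numbers once, compute the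
--     # closed-form renaming (registers above the count of distinct positive
--     # registers fill the gaps below it, largest register -> smallest gap) and
--     # rewrite the code in a single pass. (A mutates `code` in place; this
--     # builds a new list — the equivalence claimed is about the return value.)
--     used = set()
--     for line in code:
--         for token in line[1:]:
--             if token.startswith("R"):
--                 used.add(int(token[1:], 0))
--     pos = sorted(x for x in used if x > 0)
--     n = len(pos)
--     gaps = [g for g in range(1, n + 1) if g not in used]
--     high = [x for x in pos if x > n]
--     mapping = {f"R{x}": f"R{g}" for x, g in zip(reversed(high), gaps)}
--     if not mapping:
--         return code, n, False
--     newcode = [[mapping.get(t, t) for t in line] for line in code]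
--     return newcode, n, True
-- ===== Notes on version B (the rewrite author's own statement) =====
-- stated objective: alternative
-- what changed: A repeatedly rescans and rewrites the whole code (recomputing MINREG each time) once per candidate register number; B collects the used registers once, computes the final renaming in closed form (registers above the count n of distinct positive registers fill the gaps below n, largest register into the smallest gap) and rewrites the code in a single dictionary pass. Intended as the asymptotically cheaper algorithm (O(code + n log n) vs O(MINREG*code)), but a timing run measured only ~1.4x on the generated inputs, so no speed is claimed.
import Mathlib
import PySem

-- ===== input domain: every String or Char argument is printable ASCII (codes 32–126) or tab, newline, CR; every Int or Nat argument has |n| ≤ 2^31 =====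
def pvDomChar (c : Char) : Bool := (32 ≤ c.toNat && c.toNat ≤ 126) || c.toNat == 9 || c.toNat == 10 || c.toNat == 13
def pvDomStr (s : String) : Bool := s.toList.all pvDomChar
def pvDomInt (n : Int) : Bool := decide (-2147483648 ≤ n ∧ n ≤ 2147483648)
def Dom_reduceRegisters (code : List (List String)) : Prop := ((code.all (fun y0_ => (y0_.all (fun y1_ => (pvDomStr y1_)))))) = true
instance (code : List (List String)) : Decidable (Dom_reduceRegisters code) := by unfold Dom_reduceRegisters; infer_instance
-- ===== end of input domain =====

-- B replaces A's O(MINREG)·rescan compaction loop by a closed-form register map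
-- (registers above the count of distinct positive registers fill the gaps below it,
-- largest register into the smallest gap) applied in one pass over the code.
-- A mutates `code` in place; B builds a new list — the equivalence is about the return value.


-- ===== PORT A =====
-- int(token[1:], 0)  (PySem.Int.ofStrBase? with base 0 is exact); shared by both ports,
-- both Pythons contain this very expression.
def pvTokVal? (tok : String) : Option Int :=
  PySem.Int.ofStrBase? (PySem.Str.slice tok (some 1) none) 0

-- f"R{m}"  (exact: str(m) is PySem.Int.toChars m); shared by both ports.
def pvRTok (m : Int) : String := String.ofList ('R' :: PySem.Int.toChars m)

-- A's first loop: collect the distinct register numbers of all argument tokens.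
def pvCollectA (code : List (List String)) : List Int :=
  code.foldl (fun acc line =>
    (PySem.List.slice line (some 1) none).foldl (fun acc tok =>
      if PySem.Str.startswith tok "R" = true then
        match pvTokVal? tok with
        | some number => if acc.contains number = true then acc else acc ++ [number]
        | none => acc      -- int() raises ValueError here: outside Pre_
      else acc) acc) []

-- calculateMINREG
def pvCalculateMINREG (code : List (List String)) : Int :=
  code.foldl (fun M line =>
    (PySem.List.slice line (some 1) none).foldl (fun M tok =>
      if PySem.Str.startswith tok "R" = true then
        match pvTokVal? tok with
        | some number => if number > M then number else M
        | none => M      -- int() raises ValueError here: outside Pre_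
      else M) M) 0

-- the enumerate/enumerate inner loops: rewrite every token equal to `old` to `new`
def pvRenameA (code : List (List String)) (old new : String) : List (List String) :=
  code.map (fun line => line.map (fun tok => if tok = old then new else tok))

-- the while loop; fuel = initial MINREG + 1 bounds the iteration count (pointer grows by
-- one per iteration and MINREG never grows), so the fuel-0 branch is never taken on Pre_.
def pvLoopA (fuel : Nat) (code : List (List String)) (useful : List Int)
    (MINREG pointer : Int) (success : Bool) : List (List String) × Int × Bool :=
  match fuel with
  | 0 => (code, MINREG, success)
  | fuel + 1 =>
    if pointer ≤ MINREG then
      if useful.contains pointer = true then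
        pvLoopA fuel code useful MINREG (pointer + 1) success
      else
        let code' := pvRenameA code (pvRTok MINREG) (pvRTok pointer)
        -- usefulRegisters.pop(usefulRegisters.index(MINREG)): remove the first MINREG;
        -- absent MINREG is Python's ValueError, outside Pre_ (the .getD keeps the list).
        let useful' := ((PySem.List.remove? useful MINREG).getD useful) ++ [pointer]
        pvLoopA fuel code' useful' (pvCalculateMINREG code') (pointer + 1) true
    else (code, MINREG, success)

def reduceRegisters (code : List (List String)) : List (List String) × Int × Bool :=
  let usefulRegisters := pvCollectA code
  let MINREG := pvCalculateMINREG code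
  pvLoopA (MINREG.toNat + 1) code usefulRegisters MINREG 1 false

-- ===== PORT B =====
-- B's collection loop (a Python set; same traversal, Set.add semantics)
def pvCollectB (code : List (List String)) : PySem.Set Int :=
  code.foldl (fun used line =>
    (PySem.List.slice line (some 1) none).foldl (fun used tok =>
      if PySem.Str.startswith tok "R" = true then
        match pvTokVal? tok with
        | some n => PySem.Set.add used n
        | none => used      -- int() raises ValueError here: outside Pre_
      else used) used) PySem.Set.empty

def reduceRegisters_alt (code : List (List String)) : List (List String) × Int × Bool :=
  let used := pvCollectB code
  -- sorted(x for x in used if x > 0): order-independent of the set's iteration order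
  let pos := PySem.List.sorted (used.filter (fun x => decide (0 < x))) (fun x => x) false
  let n : Int := PySem.List.len pos
  let gaps := (PySem.List.pyRange 1 (n + 1) 1).filter (fun g => !(PySem.Set.contains used g))
  let high := pos.filter (fun x => decide (n < x))
  let mapping : PySem.Dict String String :=
    PySem.Dict.ofList ((high.reverse.zip gaps).map (fun p => (pvRTok p.1, pvRTok p.2)))
  if mapping.size = 0 then (code, n, false)
  else (code.map (fun line => line.map (fun t => mapping.getD t t)), n, true)

-- ===== PRECONDITION & SPEC =====
-- canonical register token: its tail parses under int(·, 0) and the token is exactly f"R{value}"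
def pvCanonTok (t : String) : Bool :=
  match PySem.Int.ofStrBase? (PySem.Str.slice t (some 1) none) 0 with
  | some m => t == pvRTok m
  | none => false

-- Pre_ excludes code whose argument tokens starting with "R" are not canonical decimal
-- register literals (e.g. "R", "Rx", "R0x10", "R+5", "R 5"): on those A either raises
-- (ValueError from int(), or "x is not in list" once such a register must be renamed) or,
-- when the odd register never has to move, returns with the token accidentally untouched.
-- The second conjunct is a mathematical fact (decimal literals round-trip through int(·,0)),
-- stated for the finitely many candidate gap values because PySem ships no general
-- round-trip lemma for its int parser; it excludes no inputs.
def Pre_reduceRegisters (code : List (List String)) : Prop :=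
  (∀ line ∈ code, ∀ t ∈ line.drop 1,
      PySem.Str.startswith t "R" = true → pvCanonTok t = true) ∧
  (∀ g ∈ PySem.List.pyRange 1 ((code.map (fun l => (l.length : Int))).sum + 1) 1,
      PySem.Int.ofCharsBase? (PySem.Int.toChars g) 0 = some g)
instance (code : List (List String)) : Decidable (Pre_reduceRegisters code) := by
  unfold Pre_reduceRegisters; infer_instance

def pvWitness_reduceRegisters : List (List String) :=
  [["ADD", "R5", "R1"], ["MOV", "R1", "R5"], ["JMP", ".loop"]]

def Spec_reduceRegisters (code : List (List String)) (out : List (List String) × Int × Bool) : Prop :=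
  out = reduceRegisters_alt code
instance (code : List (List String)) (out : List (List String) × Int × Bool) :
    Decidable (Spec_reduceRegisters code out) := by unfold Spec_reduceRegisters; infer_instance

-- ===== CLAIM (what is proved, stated in full; the proofs are below) =====
def Claim_equal_reduceRegisters : Prop :=
  ∀ (code : List (List String)), Dom_reduceRegisters code → Pre_reduceRegisters code →
    Spec_reduceRegisters code (reduceRegisters code)


-- ===== LEMMAS AND PROOFS =====

-- ---- proof-side abbreviations ----
def pvToks (code : List (List String)) : List String := code.flatMap (fun l => l.drop 1)

def pvVal? (t : String) : Option Int :=
  if PySem.Str.startswith t "R" = true then pvTokVal? t else none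

def pvRegs (code : List (List String)) : List Int := (pvToks code).filterMap pvVal?

def pvRT (m : Int) : Prop := PySem.Int.ofCharsBase? (PySem.Int.toChars m) 0 = some m

def pvCanonC (code : List (List String)) : Prop :=
  ∀ t ∈ pvToks code, ∀ m, pvVal? t = some m → t = pvRTok m

def pvSubst (o w t : String) : String := if t = o then w else t

def pvMaxStep : Int → Int → Int := fun M x => if x > M then x else M

def pvCur (code0 : List (List String)) (G Hd : List Int) (j : Nat) (x : Int) : Prop :=
  (x ∈ pvRegs code0 ∧ x ∉ Hd.take j) ∨ x ∈ G.take j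

def pvRen (c : List (List String)) (pr : Int × Int) : List (List String) :=
  pvRenameA c (pvRTok pr.1) (pvRTok pr.2)

structure PvCtx (code0 : List (List String)) (G Hd : List Int) (n : Int) : Prop where
  hGsort : G.Pairwise (· < ·)
  hHsort : Hd.Pairwise (fun a b => b < a)
  hlen : G.length = Hd.length
  hGmem : ∀ g : Int, g ∈ G ↔ (1 ≤ g ∧ g ≤ n ∧ g ∉ pvRegs code0)
  hHmem : ∀ x : Int, x ∈ Hd ↔ (x ∈ pvRegs code0 ∧ n < x)
  hnn : 0 ≤ n
  hRT0 : ∀ x ∈ pvRegs code0, pvRT x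
  hRTg : ∀ g : Int, 1 ≤ g → g ≤ n → pvRT g

-- ---- string/token facts ----
lemma pv_toList_pvRTok (m : Int) : (pvRTok m).toList = 'R' :: PySem.Int.toChars m := by
  simp [pvRTok, String.toList_ofList]

lemma pv_startswith_pvRTok (m : Int) : PySem.Str.startswith (pvRTok m) "R" = true := by
  rw [PySem.Str.startswith_eq, pv_toList_pvRTok, show ("R" : String).toList = ['R'] from by decide]
  exact (PySem.Chars.startswith_iff _ _).mpr ⟨PySem.Int.toChars m, rfl⟩

lemma pv_slice_pvRTok (m : Int) :
    PySem.Str.slice (pvRTok m) (some 1) none = String.ofList (PySem.Int.toChars m) := by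
  rw [← String.toList_inj, PySem.Str.toList_slice, PySem.Chars.slice_eq_listSlice,
    PySem.List.slice_from_one, pv_toList_pvRTok, String.toList_ofList, List.tail_cons]

lemma pv_val_pvRTok {m : Int} (h : pvRT m) : pvVal? (pvRTok m) = some m := by
  rw [pvVal?, if_pos (pv_startswith_pvRTok m), pvTokVal?, pv_slice_pvRTok,
    PySem.Int.ofStrBase?_ofList]
  exact h

lemma pv_pvRTok_inj {a b : Int} (ha : pvRT a) (hb : pvRT b) (h : pvRTok a = pvRTok b) : a = b := by
  have h2 : 'R' :: PySem.Int.toChars a = 'R' :: PySem.Int.toChars b := by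
    rw [← pv_toList_pvRTok, ← pv_toList_pvRTok, h]
  have h3 : PySem.Int.toChars a = PySem.Int.toChars b := by simpa using h2
  have := ha
  rw [pvRT, h3, hb] at this
  exact (Option.some_inj.mp this).symm

-- ---- the shared double traversal ----
lemma pv_fold2 {γ : Type} (code : List (List String)) (f : γ → String → γ) (init : γ) :
    code.foldl (fun a l => (PySem.List.slice l (some 1) none).foldl f a) init
      = (pvToks code).foldl f init := by
  simp [pvToks, List.foldl_flatMap, PySem.List.slice_from_one, List.drop_one]

lemma pv_foldR {γ : Type} (toks : List String) (g : γ → Int → γ) (init : γ) :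
    toks.foldl (fun a t =>
      if PySem.Str.startswith t "R" = true then
        match pvTokVal? t with
        | some n => g a n
        | none => a
      else a) init
      = (toks.filterMap pvVal?).foldl g init := by
  induction toks generalizing init with
  | nil => rfl
  | cons t rest ih =>
    simp only [List.foldl_cons, List.filterMap_cons]
    by_cases hs : PySem.Str.startswith t "R" = true
    · cases hv : pvTokVal? t with
      | some n =>
        simp only [pvVal?, hs, hv, ite_true]
        exact ih _
      | none =>
        simp only [pvVal?, hs, hv, ite_true]
        exact ih _
    · simp only [Bool.not_eq_true] at hs
      simp only [pvVal?, hs, Bool.false_eq_true, ite_false]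
      exact ih _

lemma pv_collectA (code : List (List String)) :
    pvCollectA code = PySem.Set.ofList (pvRegs code) := by
  rw [pvCollectA, pv_fold2]
  have h := pv_foldR (pvToks code)
    (fun (acc : List Int) (number : Int) => if acc.contains number = true then acc else acc ++ [number]) []
  simp only [] at h
  rw [h, PySem.Set.ofList_eq_foldl, pvRegs]
  have hadd : (fun (acc : List Int) (number : Int) =>
      if acc.contains number = true then acc else acc ++ [number]) = PySem.Set.add := by
    funext acc number; rfl
  rw [hadd]

lemma pv_collectB (code : List (List String)) :
    pvCollectB code = PySem.Set.ofList (pvRegs code) := by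
  rw [pvCollectB, pv_fold2]
  have h := pv_foldR (pvToks code) (fun (used : List Int) (n : Int) => PySem.Set.add used n) PySem.Set.empty
  simp only [] at h
  rw [h, PySem.Set.ofList_eq_foldl, pvRegs]
  have hadd : (fun (used : List Int) (n : Int) => PySem.Set.add used n) = PySem.Set.add := by
    funext used n; rfl
  rw [hadd]
  rfl

lemma pv_minreg (code : List (List String)) :
    pvCalculateMINREG code = (pvRegs code).foldl pvMaxStep 0 := by
  rw [pvCalculateMINREG, pv_fold2, pvRegs]
  have h := pv_foldR (pvToks code) (fun (M number : Int) => if number > M then number else M) 0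
  simp only [] at h
  rw [h]
  have hstep : (fun (M number : Int) => if number > M then number else M) = pvMaxStep := by
    funext M number; rfl
  rw [hstep]

-- ---- fold-max facts ----
lemma pv_maxfold_spec (L : List Int) (init : Int) :
    init ≤ L.foldl pvMaxStep init ∧ (L.foldl pvMaxStep init = init ∨ L.foldl pvMaxStep init ∈ L)
      ∧ ∀ x ∈ L, x ≤ L.foldl pvMaxStep init := by
  induction L generalizing init with
  | nil => simp
  | cons y rest ih =>
    obtain ⟨h1, h2, h3⟩ := ih (pvMaxStep init y)
    have hy : init ≤ pvMaxStep init y ∧ y ≤ pvMaxStep init y := by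
      unfold pvMaxStep; split <;> omega
    refine ⟨le_trans hy.1 h1, ?_, ?_⟩
    · rcases h2 with h2 | h2
      · rw [List.foldl_cons, h2]
        unfold pvMaxStep; split
        · simp
        · simp
      · simp [List.foldl_cons, h2]
    · intro x hx
      rcases List.mem_cons.mp hx with rfl | hx
      · exact le_trans hy.2 h1
      · exact h3 x hx

lemma pv_maxfold_eq (L : List Int) (v : Int) (h1 : ∀ x ∈ L, x ≤ v) (h2 : 0 ≤ v)
    (h3 : v = 0 ∨ v ∈ L) : L.foldl pvMaxStep 0 = v := by
  obtain ⟨s1, s2, s3⟩ := pv_maxfold_spec L 0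
  have hle : L.foldl pvMaxStep 0 ≤ v := by
    rcases s2 with h | h
    · omega
    · exact h1 _ h
  have hge : v ≤ L.foldl pvMaxStep 0 := by
    rcases h3 with rfl | h
    · exact s1
    · exact s3 _ h
  omega

-- ---- renaming on the value level ----
lemma pv_toks_rename (code : List (List String)) (o w : String) :
    pvToks (pvRenameA code o w) = (pvToks code).map (pvSubst o w) := by
  have hsub : (fun tok => if tok = o then w else tok) = pvSubst o w := by funext t; rfl
  simp [pvToks, pvRenameA, List.map_flatMap, List.flatMap_map, List.drop_one, hsub,
    List.map_tail]

lemma pv_canonC_of_pre (code : List (List String)) (h : Pre_reduceRegisters code) :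
    pvCanonC code := by
  intro t ht m hm
  obtain ⟨line, hline, ht2⟩ := List.mem_flatMap.mp ht
  cases hs : PySem.Str.startswith t "R" with
  | false =>
    rw [pvVal?] at hm
    simp only [hs, Bool.false_eq_true, ite_false] at hm
    exact absurd hm (by simp)
  | true =>
    have hc := h.1 line hline t ht2 hs
    rw [pvCanonTok] at hc
    rw [pvVal?, if_pos hs, pvTokVal?] at hm
    rw [hm] at hc
    exact eq_of_beq hc

lemma pv_canon_rename {code : List (List String)} {M p : Int} (hc : pvCanonC code)
    (hp : pvRT p) : pvCanonC (pvRenameA code (pvRTok M) (pvRTok p)) := by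
  intro t ht m hm
  rw [pv_toks_rename] at ht
  obtain ⟨t0, ht0, rfl⟩ := List.mem_map.mp ht
  by_cases he : t0 = pvRTok M
  · rw [pvSubst, if_pos he] at hm ⊢
    rw [pv_val_pvRTok hp] at hm
    rw [← Option.some_inj.mp hm]
  · rw [pvSubst, if_neg he] at hm ⊢
    exact hc t0 ht0 m hm

lemma pv_regs_rename {code : List (List String)} {M p : Int} (hc : pvCanonC code)
    (hM : pvRT M) (hp : pvRT p) :
    pvRegs (pvRenameA code (pvRTok M) (pvRTok p))
      = (pvRegs code).map (fun x => if x = M then p else x) := by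
  simp only [pvRegs]
  rw [pv_toks_rename, List.filterMap_map, List.map_filterMap]
  apply List.filterMap_congr
  intro t ht
  simp only [Function.comp]
  by_cases he : t = pvRTok M
  · subst he
    rw [pvSubst, if_pos rfl, pv_val_pvRTok hp, pv_val_pvRTok hM]
    simp
  · rw [pvSubst, if_neg he]
    cases hv : pvVal? t with
    | none => simp
    | some x =>
      have hcan := hc t ht x hv
      have hxM : x ≠ M := fun hxm => he (by rw [hcan, hxm])
      simp [hxM]

lemma pv_notmem_take_getElem {l : List Int} (hnd : l.Nodup) {j : Nat} (hj : j < l.length) :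
    l[j] ∉ l.take j := by
  intro hmem
  obtain ⟨i, hi, hij⟩ := List.mem_take_iff_getElem.mp hmem
  have : i = j := hnd.getElem_inj_iff.mp hij
  omega

lemma pv_head_lt_of_mem_dropsucc {l : List Int} (hs : l.Pairwise (fun a b => b < a))
    {j : Nat} (hj : j < l.length) : ∀ y ∈ l.drop (j + 1), y < l[j] := by
  have h2 := hs.drop (i := j)
  rw [List.drop_eq_getElem_cons hj] at h2
  exact (List.pairwise_cons.mp h2).1

lemma pv_head_lt_of_mem_dropsucc' {l : List Int} (hs : l.Pairwise (· < ·))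
    {j : Nat} (hj : j < l.length) : ∀ y ∈ l.drop (j + 1), l[j] < y := by
  have h2 := hs.drop (i := j)
  rw [List.drop_eq_getElem_cons hj] at h2
  exact (List.pairwise_cons.mp h2).1

-- ---- the value of calculateMINREG at stage j ----
lemma pv_minreg_val {code0 : List (List String)} {G Hd : List Int} {n : Int}
    (ctx : PvCtx code0 G Hd n) (j : Nat) (_hj : j ≤ G.length) (L : List Int)
    (hmem : ∀ x : Int, x ∈ L ↔ pvCur code0 G Hd j x) :
    L.foldl pvMaxStep 0 = (Hd.drop j).headD n := by
  have hHnodup : Hd.Nodup := ctx.hHsort.imp fun h => ne_of_gt h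
  by_cases hjH : j < Hd.length
  · have hdrop := List.drop_eq_getElem_cons hjH
    rw [hdrop, List.headD_cons]
    have hHj := (ctx.hHmem Hd[j]).mp (List.getElem_mem hjH)
    apply pv_maxfold_eq
    · intro x hx
      rcases (hmem x).mp hx with ⟨hx0, hxt⟩ | hxG
      · by_cases hxn : x ≤ n
        · omega
        · have hxH : x ∈ Hd := (ctx.hHmem x).mpr ⟨hx0, by omega⟩
          rw [← List.take_append_drop j Hd] at hxH
          rcases List.mem_append.mp hxH with h | h
          · exact absurd h hxt
          · rw [hdrop] at h
            rcases List.mem_cons.mp h with rfl | h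
            · exact le_refl _
            · exact le_of_lt (pv_head_lt_of_mem_dropsucc ctx.hHsort hjH _ h)
      · have hb := (ctx.hGmem x).mp (List.mem_of_mem_take hxG)
        omega
    · have := ctx.hnn; omega
    · right
      exact (hmem _).mpr (Or.inl ⟨hHj.1, pv_notmem_take_getElem hHnodup hjH⟩)
  · have hdrop : Hd.drop j = [] := List.drop_eq_nil_of_le (by omega)
    rw [hdrop, List.headD_nil]
    apply pv_maxfold_eq
    · intro x hx
      rcases (hmem x).mp hx with ⟨hx0, hxt⟩ | hxG
      · by_cases hxn : x ≤ n
        · exact hxn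
        · exfalso
          have hxH : x ∈ Hd := (ctx.hHmem x).mpr ⟨hx0, by omega⟩
          rw [List.take_of_length_le (by omega)] at hxt
          exact hxt hxH
      · exact ((ctx.hGmem x).mp (List.mem_of_mem_take hxG)).2.1
    · exact ctx.hnn
    · by_cases hn0 : n = 0
      · exact Or.inl hn0
      · right
        apply (hmem n).mpr
        by_cases hnr : (n : Int) ∈ pvRegs code0
        · refine Or.inl ⟨hnr, fun hmem' => ?_⟩
          have := (ctx.hHmem n).mp (List.mem_of_mem_take hmem')
          omega
        · refine Or.inr ?_
          have hnG : n ∈ G := (ctx.hGmem n).mpr ⟨by have := ctx.hnn; omega, le_refl n, hnr⟩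
          rw [List.take_of_length_le (by rw [ctx.hlen]; omega)]
          exact hnG

-- ---- the grand loop invariant ----
lemma pv_loop_main {code0 : List (List String)} {G Hd : List Int} {n : Int}
    (ctx : PvCtx code0 G Hd n) :
    ∀ (fuel j : Nat) (p : Int) (code : List (List String)) (useful : List Int) (succ : Bool),
      j ≤ G.length →
      code = ((Hd.zip G).take j).foldl pvRen code0 →
      pvCanonC code →
      (∀ x : Int, x ∈ pvRegs code ↔ pvCur code0 G Hd j x) →
      (∀ x : Int, x ∈ useful ↔ pvCur code0 G Hd j x) →
      useful.Nodup →
      (∀ g ∈ G.drop j, p ≤ g) →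
      (∀ q : Int, 1 ≤ q → q < p → pvCur code0 G Hd j q) →
      1 ≤ p →
      succ = decide (0 < j) →
      ((Hd.drop j).headD n + 1 - p).toNat < fuel →
      pvLoopA fuel code useful ((Hd.drop j).headD n) p succ
        = ((Hd.zip G).foldl pvRen code0, n, decide (0 < G.length)) := by
  have hHnodup : Hd.Nodup := ctx.hHsort.imp fun h => ne_of_gt h
  have hGnodup : G.Nodup := ctx.hGsort.imp fun h => ne_of_lt h
  have hlen := ctx.hlen
  have hnn := ctx.hnn
  intro fuel
  induction fuel with
  | zero =>
    intro j p code useful succ hj hcode hcanon hregs huse hnodup hgap hlow hp hsucc hfuel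
    exact absurd hfuel (Nat.not_lt_zero _)
  | succ fuel ih =>
    intro j p code useful succ hj hcode hcanon hregs huse hnodup hgap hlow hp hsucc hfuel
    -- the member-of-the-current-set argument used in two places below
    have hcur_of_le : j = G.length → p ≤ n → pvCur code0 G Hd j p := by
      intro hjk hpn
      by_cases hpr : p ∈ pvRegs code0
      · refine Or.inl ⟨hpr, fun hmem' => ?_⟩
        have := (ctx.hHmem p).mp (List.mem_of_mem_take hmem')
        omega
      · refine Or.inr ?_
        have hpG : p ∈ G := (ctx.hGmem p).mpr ⟨hp, hpn, hpr⟩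
        rw [List.take_of_length_le (by omega)]
        exact hpG
    simp only [pvLoopA]
    by_cases hguard : p ≤ (Hd.drop j).headD n
    · rw [if_pos hguard]
      by_cases hpin : useful.contains p = true
      · rw [if_pos hpin]
        have hpcur : pvCur code0 G Hd j p := (huse p).mp (List.contains_iff_mem.mp hpin)
        have hgap' : ∀ g ∈ G.drop j, p + 1 ≤ g := by
          intro g hg
          have hgd := (ctx.hGmem g).mp (List.mem_of_mem_drop hg)
          have hgne : p ≠ g := by
            intro he
            subst he
            rcases hpcur with ⟨hpr, _⟩ | hpt
            · exact hgd.2.2 hpr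
            · exact (List.disjoint_take_drop hGnodup (le_refl j)) hpt hg
          have := hgap g hg
          omega
        have hlow' : ∀ q : Int, 1 ≤ q → q < p + 1 → pvCur code0 G Hd j q := by
          intro q h1 h2
          by_cases hqp : q < p
          · exact hlow q h1 hqp
          · have : q = p := by omega
            subst this
            exact hpcur
        have hfuel' : ((Hd.drop j).headD n + 1 - (p + 1)).toNat < fuel := by omega
        exact ih j (p + 1) code useful succ hj hcode hcanon hregs huse hnodup hgap' hlow'
          (by omega) hsucc hfuel' 
      · rw [if_neg hpin]
        have hpnot : ¬ pvCur code0 G Hd j p := by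
          intro hc
          exact hpin (List.contains_iff_mem.mpr ((huse p).mpr hc))
        -- j < G.length: otherwise p would be in the current set
        have hjlt : j < G.length := by
          rcases lt_or_eq_of_le hj with h | h
          · exact h
          · exfalso
            have hdrop : Hd.drop j = [] := List.drop_eq_nil_of_le (by omega)
            rw [hdrop, List.headD_nil] at hguard
            exact hpnot (hcur_of_le h hguard)
        have hjH : j < Hd.length := by omega
        have hHdrop := List.drop_eq_getElem_cons hjH
        have hGdrop := List.drop_eq_getElem_cons hjlt
        have hMval : (Hd.drop j).headD n = Hd[j] := by rw [hHdrop, List.headD_cons]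
        have hHj := (ctx.hHmem Hd[j]).mp (List.getElem_mem hjH)
        have hGj := (ctx.hGmem G[j]).mp (List.getElem_mem hjlt)
        have hpGj : p ≤ G[j] := hgap G[j] (by rw [hGdrop]; exact List.mem_cons_self ..)
        -- p is exactly the j-th gap
        have hpj : p = G[j] := by
          have hpG : p ∈ G := by
            apply (ctx.hGmem p).mpr
            refine ⟨hp, by omega, fun hpr => ?_⟩
            apply hpnot
            refine Or.inl ⟨hpr, fun hmem' => ?_⟩
            have := (ctx.hHmem p).mp (List.mem_of_mem_take hmem')
            omega
          rw [← List.take_append_drop j G] at hpG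
          rcases List.mem_append.mp hpG with h | h
          · exact absurd (Or.inr h) hpnot
          · rw [hGdrop] at h
            rcases List.mem_cons.mp h with h | h
            · exact h
            · have := pv_head_lt_of_mem_dropsucc' ctx.hGsort hjlt _ h
              omega
        have hRTM : pvRT Hd[j] := ctx.hRT0 _ hHj.1
        have hRTp : pvRT p := ctx.hRTg p hp (by omega)
        have hMuse : Hd[j] ∈ useful :=
          (huse _).mpr (Or.inl ⟨hHj.1, pv_notmem_take_getElem hHnodup hjH⟩)
        rw [hMval]
        have hrem : (PySem.List.remove? useful Hd[j]).getD useful = useful.erase Hd[j] := by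
          rw [PySem.List.remove?_eq_some_erase useful Hd[j] hMuse, Option.getD_some]
        rw [hrem]
        -- take (j+1) decompositions
        have hGt : G.take (j + 1) = G.take j ++ [G[j]] := by
          rw [List.take_add_one, List.getElem?_eq_getElem hjlt, Option.toList_some]
        have hHt : Hd.take (j + 1) = Hd.take j ++ [Hd[j]] := by
          rw [List.take_add_one, List.getElem?_eq_getElem hjH, Option.toList_some]
        have hnHj : n < Hd[j] := hHj.2
        have hGjn : G[j] ≤ n := hGj.2.1
        -- the new code is the (j+1)-stage fold
        have hcode' : pvRenameA code (pvRTok Hd[j]) (pvRTok p)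
            = ((Hd.zip G).take (j + 1)).foldl pvRen code0 := by
          have hjz : j < (Hd.zip G).length := by rw [List.length_zip]; omega
          rw [List.take_add_one, List.getElem?_eq_getElem hjz, Option.toList_some,
            List.foldl_append, List.getElem_zip, ← hcode, List.foldl_cons, List.foldl_nil,
            pvRen, hpj]
        -- membership after the rename
        have hregs' : ∀ x : Int, x ∈ pvRegs (pvRenameA code (pvRTok Hd[j]) (pvRTok p))
            ↔ pvCur code0 G Hd (j + 1) x := by
          intro x
          rw [pv_regs_rename hcanon hRTM hRTp, List.mem_map]
          constructor
          · rintro ⟨y, hy, hyx⟩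
            by_cases hyM : y = Hd[j]
            · rw [if_pos hyM] at hyx
              subst hyx
              refine Or.inr ?_
              rw [hGt, hpj]
              exact List.mem_append_right _ (List.mem_singleton_self _)
            · rw [if_neg hyM] at hyx
              subst hyx
              rcases (hregs y).mp hy with ⟨h1, h2⟩ | h3
              · refine Or.inl ⟨h1, ?_⟩
                rw [hHt]
                simp only [List.mem_append, List.mem_singleton]
                rintro (h | h)
                · exact h2 h
                · exact hyM h
              · exact Or.inr (by rw [hGt]; exact List.mem_append_left _ h3)
          · intro hx
            rcases hx with ⟨h1, h2⟩ | h3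
            · refine ⟨x, (hregs x).mpr (Or.inl ⟨h1, fun ht => h2 (by rw [hHt]; exact List.mem_append_left _ ht)⟩), ?_⟩
              rw [if_neg (fun he => h2 (by rw [hHt, he]; exact List.mem_append_right _ (List.mem_singleton_self _)))]
            · rw [hGt] at h3
              simp only [List.mem_append, List.mem_singleton] at h3
              rcases h3 with h3 | h3
              · refine ⟨x, (hregs x).mpr (Or.inr h3), ?_⟩
                have hxn : x ≤ n := ((ctx.hGmem x).mp (List.mem_of_mem_take h3)).2.1
                rw [if_neg (by omega)]
              · refine ⟨Hd[j], (hregs _).mpr (Or.inl ⟨hHj.1, pv_notmem_take_getElem hHnodup hjH⟩), ?_⟩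
                rw [if_pos rfl, hpj, h3]
        -- membership of the new useful list
        have huse' : ∀ x : Int, x ∈ useful.erase Hd[j] ++ [p]
            ↔ pvCur code0 G Hd (j + 1) x := by
          intro x
          simp only [List.mem_append, List.mem_singleton, hnodup.mem_erase_iff]
          constructor
          · rintro (⟨hne, hx⟩ | rfl)
            · rcases (huse x).mp hx with ⟨h1, h2⟩ | h3
              · refine Or.inl ⟨h1, ?_⟩
                rw [hHt]
                simp only [List.mem_append, List.mem_singleton]
                rintro (h | h)
                · exact h2 h
                · exact hne h
              · exact Or.inr (by rw [hGt]; exact List.mem_append_left _ h3)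
            · refine Or.inr ?_
              rw [hGt, hpj]
              exact List.mem_append_right _ (List.mem_singleton_self _)
          · intro hx
            rcases hx with ⟨h1, h2⟩ | h3
            · refine Or.inl ⟨fun he => h2 (by rw [hHt, he]; exact List.mem_append_right _ (List.mem_singleton_self _)), (huse x).mpr (Or.inl ⟨h1, fun ht => h2 (by rw [hHt]; exact List.mem_append_left _ ht)⟩)⟩
            · rw [hGt] at h3
              simp only [List.mem_append, List.mem_singleton] at h3
              rcases h3 with h3 | h3
              · have hxn : x ≤ n := ((ctx.hGmem x).mp (List.mem_of_mem_take h3)).2.1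
                exact Or.inl ⟨by omega, (huse x).mpr (Or.inr h3)⟩
              · exact Or.inr (by rw [hpj, h3])
        have hnodup' : (useful.erase Hd[j] ++ [p]).Nodup := by
          rw [List.nodup_append]
          refine ⟨hnodup.erase _, List.nodup_singleton _, ?_⟩
          intro a ha b hb
          rw [List.mem_singleton] at hb
          subst hb
          intro he
          subst he
          exact hpnot ((huse a).mp (hnodup.mem_erase_iff.mp ha).2)
        -- the recomputed MINREG
        have hM' : pvCalculateMINREG (pvRenameA code (pvRTok Hd[j]) (pvRTok p))
            = (Hd.drop (j + 1)).headD n := by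
          rw [pv_minreg]
          exact pv_minreg_val ctx (j + 1) (by omega) _ hregs'
        rw [hM']
        have hgap' : ∀ g ∈ G.drop (j + 1), p + 1 ≤ g := by
          intro g hg
          have := pv_head_lt_of_mem_dropsucc' ctx.hGsort hjlt _ hg
          omega
        have hlow' : ∀ q : Int, 1 ≤ q → q < p + 1 → pvCur code0 G Hd (j + 1) q := by
          intro q h1 h2
          by_cases hqp : q < p
          · rcases hlow q h1 hqp with ⟨ha, hb⟩ | hc
            · refine Or.inl ⟨ha, ?_⟩
              rw [hHt]
              simp only [List.mem_append, List.mem_singleton]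
              rintro (h | h)
              · exact hb h
              · omega
            · exact Or.inr (by rw [hGt]; exact List.mem_append_left _ hc)
          · have : q = p := by omega
            subst this
            refine Or.inr ?_
            rw [hGt, hpj]
            exact List.mem_append_right _ (List.mem_singleton_self _)
        have hfuel' : ((Hd.drop (j + 1)).headD n + 1 - (p + 1)).toNat < fuel := by
          have hlt : (Hd.drop (j + 1)).headD n < Hd[j] := by
            by_cases hj1 : j + 1 < Hd.length
            · rw [List.drop_eq_getElem_cons hj1, List.headD_cons]
              exact pv_head_lt_of_mem_dropsucc ctx.hHsort hjH _
                (by rw [List.drop_eq_getElem_cons hj1]; exact List.mem_cons_self ..)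
            · rw [List.drop_eq_nil_of_le (by omega), List.headD_nil]
              exact hnHj
          rw [hMval] at hfuel hguard
          omega
        exact ih (j + 1) (p + 1) _ _ true (by omega) hcode'
          (pv_canon_rename hcanon hRTp) hregs' huse' hnodup' hgap' hlow' (by omega)
          (by simp) hfuel' 
    · rw [if_neg hguard]
      -- the loop is finished: every gap has been filled
      have hjk : j = G.length := by
        rcases lt_or_eq_of_le hj with hjlt | h
        · exfalso
          have hjH : j < Hd.length := by omega
          have hMval : (Hd.drop j).headD n = Hd[j] := by
            rw [List.drop_eq_getElem_cons hjH, List.headD_cons]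
          have hHj := (ctx.hHmem Hd[j]).mp (List.getElem_mem hjH)
          have hpGj : p ≤ G[j] :=
            hgap G[j] (by rw [List.drop_eq_getElem_cons hjlt]; exact List.mem_cons_self ..)
          have hGj := (ctx.hGmem G[j]).mp (List.getElem_mem hjlt)
          rw [hMval] at hguard
          omega
        · exact h
      have hdrop : Hd.drop j = [] := List.drop_eq_nil_of_le (by omega)
      rw [hdrop, List.headD_nil]
      have hzlen : (Hd.zip G).length = G.length := by rw [List.length_zip]; omega
      rw [hcode, List.take_of_length_le (by omega), hsucc, hjk]

-- ---- sequential renames = one dictionary pass ----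
lemma pv_fold_rename_map (pairs : List (Int × Int)) (code : List (List String)) :
    pairs.foldl pvRen code
      = code.map (fun line => line.map (fun t =>
          pairs.foldl (fun t pr => pvSubst (pvRTok pr.1) (pvRTok pr.2) t) t)) := by
  induction pairs generalizing code with
  | nil => simp
  | cons pr rest ih =>
    rw [List.foldl_cons, ih]
    simp only [pvRen, pvRenameA, List.map_map, List.foldl_cons, pvSubst, Function.comp_def]

lemma pv_subst_result (pairs : List (Int × Int)) (t : String) :
    pairs.foldl (fun t pr => pvSubst (pvRTok pr.1) (pvRTok pr.2) t) t = t
      ∨ ∃ pr ∈ pairs, pairs.foldl (fun t pr => pvSubst (pvRTok pr.1) (pvRTok pr.2) t) t = pvRTok pr.2 := by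
  induction pairs using List.reverseRecOn with
  | nil => left; rfl
  | append_singleton l pr ih =>
    rw [List.foldl_append, List.foldl_cons, List.foldl_nil]
    rcases ih with h | ⟨pr', hpr', h⟩
    · rw [h, pvSubst]
      split
      · exact Or.inr ⟨pr, List.mem_append_right _ (List.mem_singleton_self _), rfl⟩
      · exact Or.inl rfl
    · rw [h, pvSubst]
      split
      · exact Or.inr ⟨pr, List.mem_append_right _ (List.mem_singleton_self _), rfl⟩
      · exact Or.inr ⟨pr', List.mem_append_left _ hpr', rfl⟩

lemma pv_subst_id (pairs : List (Int × Int)) (t : String)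
    (h : ∀ pr ∈ pairs, t ≠ pvRTok pr.1) :
    pairs.foldl (fun t pr => pvSubst (pvRTok pr.1) (pvRTok pr.2) t) t = t := by
  induction pairs with
  | nil => rfl
  | cons pr rest ih =>
    rw [List.foldl_cons, pvSubst, if_neg (h pr (by simp))]
    exact ih fun pr' hpr' => h pr' (by simp [hpr'])

lemma pv_subst_getD (pairs : List (Int × Int))
    (hsrc : (pairs.map (fun pr => pvRTok pr.1)).Nodup)
    (hcross : ∀ pr ∈ pairs, ∀ pr' ∈ pairs, pvRTok pr.2 ≠ pvRTok pr'.1) (t : String) :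
    pairs.foldl (fun t pr => pvSubst (pvRTok pr.1) (pvRTok pr.2) t) t
      = (PySem.Dict.ofList (pairs.map (fun pr => (pvRTok pr.1, pvRTok pr.2)))).getD t t := by
  induction pairs using List.reverseRecOn with
  | nil => rfl
  | append_singleton l pr ih =>
    have hofl : ∀ (xs : List (String × String)) (p : String × String),
        PySem.Dict.ofList (xs ++ [p]) = (PySem.Dict.ofList xs).insert p.1 p.2 := by
      intro xs p
      rw [PySem.Dict.ofList, PySem.Dict.ofList, PySem.Dict.update, PySem.Dict.update,
        List.foldl_append, List.foldl_cons, List.foldl_nil]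
    rw [List.map_append, List.map_cons, List.map_nil, hofl, List.foldl_append,
      List.foldl_cons, List.foldl_nil]
    rw [List.map_append] at hsrc
    have hsrc_l : (l.map (fun pr => pvRTok pr.1)).Nodup := (List.nodup_append.mp hsrc).1
    have hnotin : pvRTok pr.1 ∉ l.map (fun pr => pvRTok pr.1) := by
      intro hmem
      have hd := (List.nodup_append.mp hsrc).2.2
      exact hd _ hmem _ (List.mem_map_of_mem (List.mem_singleton_self pr)) rfl
    have hcross_l : ∀ pr' ∈ l, ∀ pr'' ∈ l, pvRTok pr'.2 ≠ pvRTok pr''.1 :=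
      fun a ha b hb => hcross a (by simp [ha]) b (by simp [hb])
    by_cases he : t = pvRTok pr.1
    · subst he
      have hid : l.foldl (fun t pr => pvSubst (pvRTok pr.1) (pvRTok pr.2) t) (pvRTok pr.1)
          = pvRTok pr.1 := by
        apply pv_subst_id
        intro pr' hpr' heq
        exact hnotin (heq ▸ List.mem_map_of_mem hpr')
      rw [hid, pvSubst, if_pos rfl, PySem.Dict.getD_insert_self]
    · rw [PySem.Dict.getD_insert_of_ne _ _ _ he,
        ← ih hsrc_l hcross_l]
      rw [pvSubst]
      rcases pv_subst_result l t with h | ⟨pr', hpr', h⟩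
      · rw [h, if_neg he]
      · rw [h, if_neg (hcross pr' (by simp [hpr']) pr (by simp))]

-- ---- counting: as many gaps as high registers ----
lemma pv_len_eq {l1 l2 : List Int} (h1 : l1.Nodup) (h2 : l2.Nodup)
    (h : ∀ x : Int, x ∈ l1 ↔ x ∈ l2) : l1.length = l2.length := by
  exact ((List.perm_ext_iff_of_nodup h1 h2).mpr h).length_eq


lemma pv_RT_of_regs {code : List (List String)} (hcanon : pvCanonC code) :
    ∀ x ∈ pvRegs code, pvRT x := by
  intro x hx
  obtain ⟨t, ht, hv⟩ := List.mem_filterMap.mp hx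
  have hc := hcanon t ht x hv
  subst hc
  rw [pvVal?, if_pos (pv_startswith_pvRTok x), pvTokVal?, pv_slice_pvRTok,
    PySem.Int.ofStrBase?_ofList] at hv
  exact hv

lemma pv_ofList_len {α : Type} [BEq α] (l : List α) :
    (PySem.Set.ofList l).length ≤ l.length := by
  rw [PySem.Set.ofList_eq_foldl]
  suffices h : ∀ acc : List α, (l.foldl PySem.Set.add acc).length ≤ acc.length + l.length by
    simpa using h []
  induction l with
  | nil => simp
  | cons x rest ih =>
    intro acc
    rw [List.foldl_cons]
    refine le_trans (ih _) ?_
    have : (PySem.Set.add acc x).length ≤ acc.length + 1 := by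
      rw [PySem.Set.add]
      split
      · omega
      · simp
    simp only [List.length_cons]
    omega

lemma pv_toks_le_sum (code : List (List String)) :
    (pvToks code).length ≤ (code.map (fun l => l.length)).sum := by
  rw [pvToks, List.length_flatMap]
  apply List.sum_le_sum
  intro l _
  simp only [List.length_drop]
  omega

-- ===== VERDICT (by name: the statement is the Claim_ definition above) =====
theorem reduceRegisters_spec : Claim_equal_reduceRegisters := by
  intro code0 hdom hpre
  show reduceRegisters code0 = reduceRegisters_alt code0
  have hcanon := pv_canonC_of_pre code0 hpre
  have hRT0 := pv_RT_of_regs hcanon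
  have hRnodup : (PySem.Set.ofList (pvRegs code0)).Nodup := PySem.Set.nodup_ofList _
  have hRmem : ∀ x : Int, x ∈ PySem.Set.ofList (pvRegs code0) ↔ x ∈ pvRegs code0 :=
    fun x => PySem.Set.mem_ofList _ _
  set R := PySem.Set.ofList (pvRegs code0) with hR
  set pos := PySem.List.sorted (R.filter (fun x => decide (0 < x))) (fun x => x) false with hpos
  set n : Int := ((pos.length : Nat) : Int) with hn
  set G := (PySem.List.pyRange 1 (n + 1) 1).filter (fun g => !(PySem.Set.contains R g)) with hG
  set Hasc := pos.filter (fun x => decide (n < x)) with hHasc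
  set Hd := Hasc.reverse with hHd
  -- facts about pos
  have hPmem : ∀ x : Int, x ∈ pos ↔ x ∈ pvRegs code0 ∧ 0 < x := by
    intro x
    rw [hpos, PySem.List.mem_sorted, List.mem_filter]
    simp [hRmem]
  have hposnodup : pos.Nodup := by
    have := (PySem.List.sorted_perm (R.filter (fun x => decide (0 < x))) (fun x => x) false).nodup_iff
    rw [hpos]
    exact this.mpr (hRnodup.filter _)
  have hposlt : pos.Pairwise (· < ·) := by
    have h1 : pos.Pairwise (· ≤ ·) := by
      have := PySem.List.sorted_pairwise (R.filter (fun x => decide (0 < x))) (fun x => x)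
      rw [hpos]; exact this
    exact (h1.and hposnodup).imp fun h => lt_of_le_of_ne h.1 h.2
  have hnn : (0 : Int) ≤ n := by rw [hn]; positivity
  -- facts about G
  have hGmem : ∀ g : Int, g ∈ G ↔ (1 ≤ g ∧ g ≤ n ∧ g ∉ pvRegs code0) := by
    intro g
    rw [hG, List.mem_filter, PySem.List.mem_pyRange_one]
    constructor
    · rintro ⟨⟨h1, h2⟩, h3⟩
      refine ⟨h1, by omega, fun hmem => ?_⟩
      rw [Bool.not_eq_eq_eq_not, Bool.not_true, ← Bool.not_eq_true] at h3
      exact h3 ((PySem.Set.contains_iff R g).mpr ((hRmem g).mpr hmem))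
    · rintro ⟨h1, h2, h3⟩
      refine ⟨⟨h1, by omega⟩, ?_⟩
      rw [Bool.not_eq_eq_eq_not, Bool.not_true, ← Bool.not_eq_true]
      intro hc
      exact h3 ((hRmem g).mp ((PySem.Set.contains_iff R g).mp hc))
  have hGsort : G.Pairwise (· < ·) := by
    rw [hG]; exact (PySem.List.pairwise_lt_pyRange_one _ _).filter _
  -- facts about Hd
  have hHmem : ∀ x : Int, x ∈ Hd ↔ (x ∈ pvRegs code0 ∧ n < x) := by
    intro x
    rw [hHd, List.mem_reverse, hHasc, List.mem_filter]
    constructor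
    · rintro ⟨h1, h2⟩
      exact ⟨((hPmem x).mp h1).1, by simpa using h2⟩
    · rintro ⟨h1, h2⟩
      exact ⟨(hPmem x).mpr ⟨h1, by omega⟩, by simpa using h2⟩
  have hHsort : Hd.Pairwise (fun a b => b < a) := by
    rw [hHd, List.pairwise_reverse]
    exact hposlt.filter _
  -- as many gaps as high registers
  have hlen : G.length = Hd.length := by
    have hGnodup : G.Nodup := hGsort.imp fun h => ne_of_lt h
    have hA1 : ((PySem.List.pyRange 1 (n + 1) 1).filter (fun g => PySem.Set.contains R g)).length
        = (pos.filter (fun x => !(decide (n < x)))).length := by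
      apply pv_len_eq
      · exact ((PySem.List.nodup_pyRange_one _ _).filter _)
      · exact hposnodup.filter _
      · intro x
        rw [List.mem_filter, List.mem_filter, PySem.List.mem_pyRange_one]
        constructor
        · rintro ⟨⟨h1, h2⟩, h3⟩
          have hx := (hRmem x).mp ((PySem.Set.contains_iff R x).mp h3)
          exact ⟨(hPmem x).mpr ⟨hx, by omega⟩, by simp; omega⟩
        · rintro ⟨h1, h2⟩
          have hx := (hPmem x).mp h1
          simp only [Bool.not_eq_eq_eq_not, Bool.not_true, decide_eq_false_iff_not, not_lt] at h2
          refine ⟨⟨by omega, by omega⟩, (PySem.Set.contains_iff R x).mpr ((hRmem x).mpr hx.1)⟩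
    have hsplit1 : ((PySem.List.pyRange 1 (n + 1) 1).filter (fun g => PySem.Set.contains R g)).length
        + G.length = (PySem.List.pyRange 1 (n + 1) 1).length := by
      rw [hG]
      exact (List.length_eq_length_filter_add (fun g => PySem.Set.contains R g)).symm
    have hsplit2 : (pos.filter (fun x => decide (n < x))).length
        + (pos.filter (fun x => !(decide (n < x)))).length = pos.length :=
      (List.length_eq_length_filter_add (fun x => decide (n < x))).symm
    have hrange : (PySem.List.pyRange 1 (n + 1) 1).length = pos.length := by
      rw [PySem.List.length_pyRange_one, hn]
      omega
    have hHlen : Hd.length = (pos.filter (fun x => decide (n < x))).length := by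
      rw [hHd, List.length_reverse, hHasc]
    omega
  -- round trips
  have hRTg : ∀ g : Int, 1 ≤ g → g ≤ n → pvRT g := by
    intro g h1 h2
    apply hpre.2
    rw [PySem.List.mem_pyRange_one]
    refine ⟨h1, ?_⟩
    have hb1 : ((pvRegs code0).length : Int) ≥ (R.length : Int) := by
      rw [hR]; exact_mod_cast pv_ofList_len _
    have hb2 : (R.length : Int) ≥ (pos.length : Int) := by
      have : pos.length = (R.filter (fun x => decide (0 < x))).length := by
        rw [hpos, PySem.List.length_sorted]
      have hf : (R.filter (fun x => decide (0 < x))).length ≤ R.length := List.length_filter_le _ _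
      omega
    have hb3 : ((pvToks code0).length : Int) ≥ ((pvRegs code0).length : Int) := by
      exact_mod_cast List.length_filterMap_le _ _
    have hb4 : ((pvToks code0).length : Int) ≤ (((code0.map (fun l => l.length)).sum : Nat) : Int) := by
      exact_mod_cast pv_toks_le_sum code0
    have hb5 : ∀ cs : List (List String),
        (cs.map (fun l => (l.length : Int))).sum = (((cs.map (fun l => l.length)).sum : Nat) : Int) := by
      intro cs
      induction cs with
      | nil => rfl
      | cons l rest ih => simp [ih]
    have hb6 := hb5 code0
    rw [hn] at h2
    omega
  have ctx : PvCtx code0 G Hd n :=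
    ⟨hGsort, hHsort, hlen, hGmem, hHmem, hnn, hRT0, hRTg⟩
  -- the A side
  have hcur0 : ∀ x : Int, x ∈ pvRegs code0 ↔ pvCur code0 G Hd 0 x := by
    intro x; rw [pvCur]; simp
  have hM0 : pvCalculateMINREG code0 = (Hd.drop 0).headD n := by
    rw [pv_minreg]
    exact pv_minreg_val ctx 0 (by omega) _ hcur0
  have hA : reduceRegisters code0
      = ((Hd.zip G).foldl pvRen code0, n, decide (0 < G.length)) := by
    have hstart : reduceRegisters code0 = pvLoopA ((pvCalculateMINREG code0).toNat + 1) code0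
        (pvCollectA code0) (pvCalculateMINREG code0) 1 false := rfl
    rw [hstart, pv_collectA, hM0, ← hR]
    have huse0 : ∀ x : Int, x ∈ R ↔ pvCur code0 G Hd 0 x := by
      intro x; rw [hRmem]; exact hcur0 x
    apply pv_loop_main ctx _ 0 1 code0 R false (by omega) (by simp) hcanon
      (fun x => hcur0 x) huse0 hRnodup ?_ ?_ (by omega) (by simp) ?_
    · intro g hg
      rw [List.drop_zero] at hg
      exact ((hGmem g).mp hg).1
    · intro q h1 h2
      omega
    · omega
  -- the B side
  rw [hA, reduceRegisters_alt]
  simp only [pv_collectB, ← hR, PySem.List.len_eq, ← hpos, ← hn, ← hG, ← hHasc, ← hHd]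
  -- the mapping and its keys
  by_cases hGnil : G = []
  · have hHnil : Hd = [] := by
      rw [← List.length_eq_zero_iff]
      rw [← hlen, hGnil]
      rfl
    rw [hGnil, hHnil]
    simp
    rfl
  · have hzip : (Hd.zip G).length = G.length := by rw [List.length_zip]; omega
    have hGpos : 0 < G.length := List.length_pos_iff.mpr hGnil
    have hmapne : ((Hd.zip G).map (fun p => (pvRTok p.1, pvRTok p.2))) ≠ [] := by
      intro h
      have h2 := congrArg List.length h
      rw [List.length_map, hzip] at h2
      simp only [List.length_nil] at h2
      omega
    have hsize : (PySem.Dict.ofList ((Hd.zip G).map (fun p => (pvRTok p.1, pvRTok p.2)))).size ≠ 0 := by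
      cases hml : (Hd.zip G).map (fun p => (pvRTok p.1, pvRTok p.2)) with
      | nil => exact absurd hml hmapne
      | cons q rest =>
        intro hsz
        have hkeys := PySem.Dict.keys_foldl_insert_key (κ := String) (ν := String)
          (l := q :: rest) (key := Prod.fst) (f := fun _ x => x.2) (d := PySem.Dict.empty)
        have hq : q.1 ∈ (PySem.Dict.ofList (q :: rest)).keys := by
          rw [PySem.Dict.ofList, PySem.Dict.update]
          rw [show (fun (acc : PySem.Dict String String) (p : String × String) => acc.insert p.1 p.2)
              = (fun (d : PySem.Dict String String) (x : String × String) => d.insert x.1 ((fun _ x => x.2) d x)) from rfl]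
          rw [hkeys]
          have : q.1 ∈ PySem.Set.ofList ((q :: rest).map Prod.fst) := by
            rw [PySem.Set.mem_ofList]
            simp
          simpa [PySem.Set.update, PySem.Set.ofList_eq_foldl] using this
        have : (PySem.Dict.ofList (q :: rest)).keys.length = 0 := by
          have hk : (PySem.Dict.ofList (q :: rest)).keys = (PySem.Dict.ofList (q :: rest)).items.map Prod.fst := rfl
          rw [hk, List.length_map]
          exact hsz
        rw [List.length_eq_zero_iff] at this
        rw [this] at hq
        exact absurd hq (List.not_mem_nil)
    rw [if_neg hsize]
    have hsucc : decide (0 < G.length) = true := by simpa using hGpos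
    rw [hsucc]
    -- sequential renames equal the one-pass dictionary rewrite
    have hsrc : ((Hd.zip G).map (fun pr => pvRTok pr.1)).Nodup := by
      have h1 : ((Hd.zip G).map (fun pr => pvRTok pr.1)) = Hd.map pvRTok := by
        rw [show (fun (pr : Int × Int) => pvRTok pr.1) = pvRTok ∘ Prod.fst from rfl,
          ← List.map_map, List.map_fst_zip (by omega)]
      rw [h1]
      refine List.Nodup.map_on ?_ (hHsort.imp fun h => ne_of_gt h)
      intro x hx y hy hxy
      exact pv_pvRTok_inj (hRT0 x ((hHmem x).mp hx).1) (hRT0 y ((hHmem y).mp hy).1) hxy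
    have hcross : ∀ pr ∈ Hd.zip G, ∀ pr' ∈ Hd.zip G, pvRTok pr.2 ≠ pvRTok pr'.1 := by
      rintro ⟨a, b⟩ hab ⟨c, d⟩ hcd he
      have hb := (hGmem b).mp (List.of_mem_zip hab).2
      have hc := (hHmem c).mp (List.of_mem_zip hcd).1
      have := pv_pvRTok_inj (hRTg b hb.1 hb.2.1) (hRT0 c hc.1) he
      omega
    rw [pv_fold_rename_map]
    congr 1
    apply List.map_congr_left
    intro line _
    apply List.map_congr_left
    intro t _
    exact pv_subst_getD (Hd.zip G) hsrc hcross t
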